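-- pv_equiv track=rewrite | github.com/a1da4/leetcode | submissions/2554_Maximum_Number_of_Integers_to_Choose_From_a_Range_I.py | maxCount
-- ===== SOURCE A (Python) =====
-- from typing import List
--
-- def maxCount(banned: List[int], n: int, maxSum: int) -> int:
--     banned = set(banned)
--
--     answer = []
--     currSum = 0
--     for num in range(1, n + 1):
--         if num in banned:
--             continue
--         if currSum + num > maxSum:
--             break
--         currSum += num
--         answer.append(num)
--
--     return len(answer)
-- ===== SOURCE B (Python) =====
-- from typing import List
--
-- def maxCount(banned: List[int], n: int, maxSum: int) -> int:
--     # Sort the distinct in-range banned values, walk the ban-free gaps between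
--     # them, and binary-search how many consecutive integers of each gap fit.
--     bs = sorted({b for b in banned if 1 <= b <= n})
--     count = 0
--     s = 0
--     lo = 1
--     for b in bs + [n + 1]:
--         hi = b - 1
--         if lo <= hi:
--             length = hi - lo + 1
--             rem = maxSum - s
--             lo_k, hi_k = 0, length
--             while lo_k < hi_k:
--                 mid = (lo_k + hi_k + 1) // 2
--                 if mid * lo + mid * (mid - 1) // 2 <= rem:
--                     lo_k = mid
--                 else:
--                     hi_k = mid - 1
--             k = lo_k
--             count += k
--             s += k * lo + k * (k - 1) // 2
--             if k < length:
--                 return count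
--         lo = b + 1
--     return count
-- ===== Notes on version B (the rewrite author's own statement) =====
-- stated objective: faster
-- what changed: Replaces the O(n) scan over every integer in [1,n] by sorting the distinct in-range banned values and, for each ban-free gap, binary-searching how many consecutive integers fit under maxSum via the arithmetic-series closed form.
import Mathlib
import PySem

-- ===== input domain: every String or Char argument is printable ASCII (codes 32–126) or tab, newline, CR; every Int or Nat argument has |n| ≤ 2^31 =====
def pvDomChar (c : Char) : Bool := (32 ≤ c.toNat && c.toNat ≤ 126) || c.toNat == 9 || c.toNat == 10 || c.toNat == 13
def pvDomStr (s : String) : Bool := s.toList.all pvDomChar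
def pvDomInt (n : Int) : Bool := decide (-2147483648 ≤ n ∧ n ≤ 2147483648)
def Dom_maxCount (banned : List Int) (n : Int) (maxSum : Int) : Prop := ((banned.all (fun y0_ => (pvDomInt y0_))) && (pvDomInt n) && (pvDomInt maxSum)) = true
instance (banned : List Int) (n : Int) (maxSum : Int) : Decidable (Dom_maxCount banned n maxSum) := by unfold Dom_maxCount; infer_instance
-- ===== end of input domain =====

-- B replaces A's O(n) scan of [1,n] by a sort of the distinct in-range banned
-- values plus, per ban-free gap, a binary search on the arithmetic-series sum
-- (objective: faster).

-- ===== PORT A =====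
-- the for-loop of A over num in range(1, n+1): state (currSum, answer);
-- `continue` recurses unchanged, `break` returns the answer list
def maxCountLoopA (bset : PySem.Set Int) (maxSum n : Int)
    (num currSum : Int) (answer : List Int) : List Int :=
  if num < n + 1 then
    if bset.contains num then maxCountLoopA bset maxSum n (num + 1) currSum answer
    else if currSum + num > maxSum then answer
    else maxCountLoopA bset maxSum n (num + 1) (currSum + num) (answer ++ [num])
  else answer
termination_by (n + 1 - num).toNat
decreasing_by all_goals omega

def maxCount (banned : List Int) (n : Int) (maxSum : Int) : Int :=
  let bset : PySem.Set Int := PySem.Set.ofList banned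
  ((maxCountLoopA bset maxSum n 1 0 []).length : Int)

-- ===== PORT B =====
-- the while-loop of B: binary search for the largest k in [lo_k, hi_k] with
-- k*lo + k*(k-1)//2 <= rem
def maxCountBSearch (lo rem : Int) (lo_k hi_k : Int) : Int :=
  if h : lo_k < hi_k then
    let mid := PySem.Int.floordiv (lo_k + hi_k + 1) 2
    if mid * lo + PySem.Int.floordiv (mid * (mid - 1)) 2 ≤ rem then
      maxCountBSearch lo rem mid hi_k
    else
      maxCountBSearch lo rem lo_k (mid - 1)
  else lo_k
termination_by (hi_k - lo_k).toNat
decreasing_by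
  all_goals
    have hb := PySem.Int.floordiv_two_mid_bounds (show lo_k + 1 ≤ hi_k by omega)
    rw [show lo_k + 1 + hi_k = lo_k + hi_k + 1 by ring] at hb
    omega

-- the for-loop of B over bs ++ [n+1]: state (lo, s, count); early return on k < length
def maxCountLoopB (maxSum : Int) : List Int → Int → Int → Int → Int
  | [], _, _, count => count
  | b :: rest, lo, s, count =>
    let hi := b - 1
    if lo ≤ hi then
      let length := hi - lo + 1
      let rem := maxSum - s
      let k := maxCountBSearch lo rem 0 length
      let count' := count + k
      let s' := s + (k * lo + PySem.Int.floordiv (k * (k - 1)) 2)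
      if k < length then count'
      else maxCountLoopB maxSum rest (b + 1) s' count'
    else maxCountLoopB maxSum rest (b + 1) s count

def maxCount_alt (banned : List Int) (n : Int) (maxSum : Int) : Int :=
  let bs := PySem.List.sorted
    (PySem.Set.ofList (banned.filter (fun b => decide (1 ≤ b ∧ b ≤ n))))
    (fun x => x) false
  maxCountLoopB maxSum (bs ++ [n + 1]) 1 0 0

-- ===== PRECONDITION & SPEC =====
def Spec_maxCount (banned : List Int) (n : Int) (maxSum : Int) (out : Int) : Prop := out = maxCount_alt banned n maxSum
instance (banned : List Int) (n : Int) (maxSum : Int) (out : Int) : Decidable (Spec_maxCount banned n maxSum out) := by unfold Spec_maxCount; infer_instance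

-- ===== CLAIM (what is proved, stated in full; the proofs are below) =====
def Claim_equal_maxCount : Prop := ∀ (banned : List Int) (n : Int) (maxSum : Int), Dom_maxCount banned n maxSum → Spec_maxCount banned n maxSum (maxCount banned n maxSum)

-- ===== LEMMAS AND PROOFS =====

-- greedy count over a list of candidates: how many prefix elements fit
def gcount (ms : Int) : List Int → Int → Int
  | [], _ => 0
  | x :: xs, s => if s + x > ms then 0 else 1 + gcount ms xs (s + x)

-- the triangular fit predicate: the first k integers lo, lo+1, … sum to ≤ rem
def triFit (lo rem k : Int) : Prop := k * lo + k * (k - 1) / 2 ≤ rem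

lemma half_mul_pred (k : Int) : k * (k - 1) / 2 * 2 = k * (k - 1) := by
  apply Int.ediv_mul_cancel
  rcases Int.even_or_odd k with h | h
  · exact Dvd.dvd.mul_right (even_iff_two_dvd.mp h) _
  · refine Dvd.dvd.mul_left ?_ _
    rcases h with ⟨m, hm⟩
    exact ⟨m, by omega⟩

lemma triFit_mono (lo rem j k : Int) (hlo : 1 ≤ lo) (hj : 0 ≤ j) (hjk : j ≤ k)
    (h : triFit lo rem k) : triFit lo rem j := by
  unfold triFit at *
  have e1 := half_mul_pred k
  have e2 := half_mul_pred j
  have hprod : 0 ≤ (k - j) * (k + j - 1) := by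
    rcases eq_or_lt_of_le hjk with rfl | hlt
    · simp
    · apply mul_nonneg <;> omega
  nlinarith [mul_nonneg (by omega : (0:Int) ≤ k - j) (by omega : (0:Int) ≤ lo - 1)]

lemma tri_succ (lo k : Int) :
    (k + 1) * lo + (k + 1) * (k + 1 - 1) / 2 = (k * lo + k * (k - 1) / 2) + (lo + k) := by
  have e1 := half_mul_pred k
  have e2 := half_mul_pred (k + 1)
  have h3 : (k + 1) * lo = k * lo + lo := by ring
  have h4 : (k + 1) * (k + 1 - 1) = k * (k - 1) + 2 * k := by ring
  omega

-- the binary search returns the number characterised by the two triFit properties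
lemma bsearch_spec (lo rem L : Int) (hlo : 1 ≤ lo) (a b : Int)
    (ha : 0 ≤ a) (hab : a ≤ b) (hbL : b ≤ L)
    (Hlow : ∀ j, 1 ≤ j → j ≤ a → triFit lo rem j)
    (Hhigh : ∀ j, b < j → j ≤ L → ¬ triFit lo rem j) :
    a ≤ maxCountBSearch lo rem a b ∧ maxCountBSearch lo rem a b ≤ b ∧
    (∀ j, 1 ≤ j → j ≤ maxCountBSearch lo rem a b → triFit lo rem j) ∧
    (maxCountBSearch lo rem a b < L → ¬ triFit lo rem (maxCountBSearch lo rem a b + 1)) := by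
  rw [maxCountBSearch]
  split
  case isTrue h =>
    simp only []
    have hmb := PySem.Int.floordiv_two_mid_bounds (show a + 1 ≤ b by omega)
    rw [show a + 1 + b = a + b + 1 by ring] at hmb
    set mid := PySem.Int.floordiv (a + b + 1) 2 with hmid
    obtain ⟨hmid1, hmid2⟩ := hmb
    have hfd : PySem.Int.floordiv (mid * (mid - 1)) 2 = mid * (mid - 1) / 2 :=
      PySem.Int.floordiv_eq_ediv_of_pos (by norm_num)
    split
    case isTrue hfit =>
      have hP : triFit lo rem mid := by unfold triFit; omega
      obtain ⟨r1, r2, r3, r4⟩ := bsearch_spec lo rem L hlo mid b (by omega) hmid2 hbL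
        (fun j h1 h2 => triFit_mono lo rem j mid hlo (by omega) h2 hP) Hhigh
      exact ⟨by omega, r2, r3, r4⟩
    case isFalse hfit =>
      have hnP : ¬ triFit lo rem mid := by unfold triFit; omega
      obtain ⟨r1, r2, r3, r4⟩ := bsearch_spec lo rem L hlo a (mid - 1) ha (by omega) (by omega)
        Hlow (fun j hj hjL hPj => by
          by_cases hjb : j ≤ b
          · exact hnP (triFit_mono lo rem mid j hlo (by omega) (by omega) hPj)
          · exact Hhigh j (by omega) hjL hPj)
      exact ⟨r1, by omega, r3, r4⟩
  case isFalse h =>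
    have hab' : a = b := by omega
    refine ⟨le_refl a, by omega, Hlow, fun hL => Hhigh (a + 1) (by omega) (by omega)⟩
termination_by (b - a).toNat
decreasing_by
  · omega
  · omega

-- the two triFit properties pin the value down uniquely
lemma fit_unique (lo rem L r1 r2 : Int) (hlo : 1 ≤ lo)
    (h01 : 0 ≤ r1) (h1L : r1 ≤ L)
    (H1l : ∀ j, 1 ≤ j → j ≤ r1 → triFit lo rem j)
    (H1h : r1 < L → ¬ triFit lo rem (r1 + 1))
    (h02 : 0 ≤ r2) (h2L : r2 ≤ L)
    (H2l : ∀ j, 1 ≤ j → j ≤ r2 → triFit lo rem j)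
    (H2h : r2 < L → ¬ triFit lo rem (r2 + 1)) : r1 = r2 := by
  rcases lt_trichotomy r1 r2 with h | h | h
  · exact absurd (H2l (r1 + 1) (by omega) (by omega)) (H1h (by omega))
  · exact h
  · exact absurd (H1l (r2 + 1) (by omega) (by omega)) (H2h (by omega))

lemma gcount_le_length (ms : Int) (xs : List Int) (s : Int) :
    gcount ms xs s ≤ (xs.length : Int) := by
  induction xs generalizing s with
  | nil => simp [gcount]
  | cons x xs ih =>
    simp only [gcount, List.length_cons]
    split
    · push_cast; omega
    · have := ih (s + x); push_cast; omega

lemma gcount_append (ms : Int) (xs ys : List Int) (s : Int) :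
    gcount ms (xs ++ ys) s =
      gcount ms xs s +
        (if gcount ms xs s = (xs.length : Int) then gcount ms ys (s + xs.sum) else 0) := by
  induction xs generalizing s with
  | nil => simp [gcount]
  | cons x xs ih =>
    simp only [List.cons_append, gcount, List.length_cons, List.sum_cons]
    by_cases h : s + x > ms
    · simp only [if_pos h]
      split_ifs with h2
      · exfalso; push_cast at h2; omega
      · omega
    · simp only [if_neg h]
      rw [ih (s + x), show s + (x + xs.sum) = s + x + xs.sum by ring]
      split_ifs with h2 h3 h3 <;> [omega; (exfalso; push_cast at h2 h3; omega);
        (exfalso; push_cast at h2 h3; omega); omega]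

lemma range_sum (lo : Int) (L : Nat) :
    (PySem.List.pyRange lo (lo + L) 1).sum = (L : Int) * lo + (L : Int) * ((L : Int) - 1) / 2 := by
  induction L with
  | zero => simp [PySem.List.pyRange_one_eq_nil (by omega : lo + (0:Nat) ≤ lo)]
  | succ L ih =>
    have hsplit : PySem.List.pyRange lo (lo + (L + 1 : Nat)) 1 =
        PySem.List.pyRange lo (lo + L) 1 ++ [lo + L] := by
      have := PySem.List.pyRange_one_succ_right (a := lo) (b := lo + L) (by omega)
      rw [show (lo + ((L + 1 : Nat) : Int)) = lo + (L : Int) + 1 by push_cast; ring]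
      exact this
    rw [hsplit, List.sum_append, ih]
    simp only [List.sum_cons, List.sum_nil]
    have := tri_succ lo (L : Int)
    push_cast
    omega

-- the greedy count on a ban-free block satisfies the two triFit properties
lemma gcount_range_spec (ms lo s : Int) (L : Nat) (hlo : 1 ≤ lo) :
    0 ≤ gcount ms (PySem.List.pyRange lo (lo + L) 1) s ∧
    gcount ms (PySem.List.pyRange lo (lo + L) 1) s ≤ (L : Int) ∧
    (∀ j, 1 ≤ j → j ≤ gcount ms (PySem.List.pyRange lo (lo + L) 1) s → triFit lo (ms - s) j) ∧
    (gcount ms (PySem.List.pyRange lo (lo + L) 1) s < (L : Int) →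
      ¬ triFit lo (ms - s) (gcount ms (PySem.List.pyRange lo (lo + L) 1) s + 1)) := by
  induction L with
  | zero =>
    simp only [PySem.List.pyRange_one_eq_nil (by omega : lo + ((0:Nat):Int) ≤ lo), gcount]
    refine ⟨le_refl 0, by omega, fun j h1 h2 => absurd h2 (by omega), fun h => absurd h (by omega)⟩
  | succ L ih =>
    obtain ⟨ih0, ihle, ihlow, ihhigh⟩ := ih
    have hsplit : PySem.List.pyRange lo (lo + (L + 1 : Nat)) 1 =
        PySem.List.pyRange lo (lo + L) 1 ++ [lo + L] := by
      have := PySem.List.pyRange_one_succ_right (a := lo) (b := lo + L) (by omega)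
      rw [show (lo + ((L + 1 : Nat) : Int)) = lo + (L : Int) + 1 by push_cast; ring]
      exact this
    set g := gcount ms (PySem.List.pyRange lo (lo + L) 1) s with hg
    have hlen : ((PySem.List.pyRange lo (lo + L) 1).length : Int) = (L : Int) := by
      rw [PySem.List.length_pyRange_one]; omega
    rw [hsplit, gcount_append, hlen, ← hg, range_sum]
    have hts := tri_succ lo (L : Int)
    by_cases hgL : g = (L : Int)
    · rw [if_pos hgL]
      simp only [gcount]
      by_cases hfits : s + ((L:Int) * lo + (L:Int) * ((L:Int) - 1) / 2) + (lo + (L:Int)) > ms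
      · rw [if_pos hfits]
        simp only [add_zero]
        refine ⟨by omega, by push_cast; omega, fun j h1 h2 => ihlow j h1 (by omega), ?_⟩
        intro _
        rw [hgL]
        unfold triFit
        omega
      · rw [if_neg hfits]
        simp only [add_zero]
        refine ⟨by omega, by push_cast; omega, ?_, ?_⟩
        · intro j h1 h2
          by_cases hj : j ≤ g
          · exact ihlow j h1 hj
          · have hjeq : j = (L : Int) + 1 := by omega
            subst hjeq
            unfold triFit
            omega
        · intro hc
          exfalso
          push_cast at hc
          omega
    · rw [if_neg hgL]
      simp only [add_zero]
      refine ⟨by omega, by push_cast; omega, fun j h1 h2 => ihlow j h1 (by omega), ?_⟩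
      intro _
      exact ihhigh (by omega)

-- binary search computes exactly the greedy count of the block
lemma bsearch_eq_gcount (ms lo s : Int) (L : Nat) (hlo : 1 ≤ lo) :
    maxCountBSearch lo (ms - s) 0 (L : Int) =
      gcount ms (PySem.List.pyRange lo (lo + L) 1) s := by
  obtain ⟨b1, b2, b3, b4⟩ := bsearch_spec lo (ms - s) (L : Int) hlo 0 (L : Int)
    (le_refl 0) (by omega) (le_refl _)
    (fun j h1 h2 => absurd h2 (by omega))
    (fun j hj hjL => absurd hjL (by omega))
  obtain ⟨g1, g2, g3, g4⟩ := gcount_range_spec ms lo s L hlo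
  exact fit_unique lo (ms - s) (L : Int) _ _ hlo b1 b2 b3 b4 g1 g2 g3 g4

-- processing the sorted banned gaps equals the greedy count over the filtered range
lemma gap_lemma (ms n : Int) (bs : List Int) :
    ∀ (lo s c : Int), 1 ≤ lo → bs.Pairwise (· < ·) → (∀ b ∈ bs, lo ≤ b ∧ b ≤ n) →
    maxCountLoopB ms (bs ++ [n + 1]) lo s c =
      c + gcount ms ((PySem.List.pyRange lo (n + 1) 1).filter
        (fun x => decide (x ∉ bs))) s := by
  induction bs with
  | nil =>
    intro lo s c hlo _ _
    have hfil : (PySem.List.pyRange lo (n + 1) 1).filter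
          (fun x => decide (x ∉ ([] : List Int))) = PySem.List.pyRange lo (n + 1) 1 := by
      apply List.filter_eq_self.mpr
      intro x _
      simp
    rw [List.nil_append, hfil]
    show maxCountLoopB ms [n + 1] lo s c = _
    simp only [maxCountLoopB]
    by_cases hcase : lo ≤ n + 1 - 1
    · rw [if_pos hcase]
      set L : Nat := (n + 1 - 1 - lo + 1).toNat with hL
      have hLi : ((L : Nat) : Int) = n + 1 - lo := by omega
      have hrange : PySem.List.pyRange lo (n + 1) 1 = PySem.List.pyRange lo (lo + L) 1 := by
        congr 1; omega
      have hbk : maxCountBSearch lo (ms - s) 0 (n + 1 - 1 - lo + 1) =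
          gcount ms (PySem.List.pyRange lo (n + 1) 1) s := by
        rw [hrange, show n + 1 - 1 - lo + 1 = ((L : Nat) : Int) by omega]
        exact bsearch_eq_gcount ms lo s L hlo
      rw [hbk]
      by_cases hlt : gcount ms (PySem.List.pyRange lo (n + 1) 1) s < n + 1 - 1 - lo + 1
      · rw [if_pos hlt]
      · rw [if_neg hlt]
    · rw [if_neg hcase]
      rw [PySem.List.pyRange_one_eq_nil (by omega : n + 1 ≤ lo)]
      simp [maxCountLoopB, gcount]
  | cons b rest ih =>
    intro lo s c hlo hpw hmem
    have hpw' : rest.Pairwise (· < ·) := hpw.of_cons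
    have hgt : ∀ x ∈ rest, b < x := by
      intro x hx; exact (List.pairwise_cons.mp hpw).1 x hx
    have hblo : lo ≤ b := (hmem b (by simp)).1
    have hbn : b ≤ n := (hmem b (by simp)).2
    -- split and simplify the filtered range
    have hsplit : PySem.List.pyRange lo (n + 1) 1 =
        PySem.List.pyRange lo b 1 ++ (b :: PySem.List.pyRange (b + 1) (n + 1) 1) := by
      rw [PySem.List.pyRange_one_append lo b (n + 1) hblo (by omega)]
      congr 1
      exact PySem.List.pyRange_one_cons (by omega)
    have hfilter1 : (PySem.List.pyRange lo b 1).filter (fun x => decide (x ∉ b :: rest)) =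
        PySem.List.pyRange lo b 1 := by
      apply List.filter_eq_self.mpr
      intro x hx
      have hxb : x < b := (PySem.List.mem_pyRange_one.mp hx).2
      simp only [decide_eq_true_eq, List.mem_cons]
      push_neg
      exact ⟨by omega, fun hxr => absurd (hgt x hxr) (by omega)⟩
    have hfilter2 : (PySem.List.pyRange (b + 1) (n + 1) 1).filter
          (fun x => decide (x ∉ b :: rest)) =
        (PySem.List.pyRange (b + 1) (n + 1) 1).filter (fun x => decide (x ∉ rest)) := by
      apply List.filter_congr
      intro x hx
      have hxb : b + 1 ≤ x := (PySem.List.mem_pyRange_one.mp hx).1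
      rw [decide_eq_decide]
      have hxb' : x ≠ b := by omega
      simp only [List.mem_cons]
      tauto
    have hbnot : (decide (b ∉ b :: rest)) = false := by simp
    rw [hsplit]
    rw [List.filter_append, hfilter1, List.filter_cons, hbnot, hfilter2]
    simp only [Bool.false_eq_true, if_false]
    rw [gcount_append]
    -- now evaluate the B-side step
    show maxCountLoopB ms (b :: (rest ++ [n + 1])) lo s c = _
    simp only [maxCountLoopB]
    by_cases hcase : lo ≤ b - 1
    · rw [if_pos hcase]
      set L : Nat := (b - 1 - lo + 1).toNat with hLdef
      have hLi : ((L : Nat) : Int) = b - lo := by omega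
      have hrange : PySem.List.pyRange lo b 1 = PySem.List.pyRange lo (lo + L) 1 := by
        congr 1; omega
      have hlen : ((PySem.List.pyRange lo b 1).length : Int) = ((L : Nat) : Int) := by
        rw [PySem.List.length_pyRange_one]; omega
      have hbk : maxCountBSearch lo (ms - s) 0 (b - 1 - lo + 1) =
          gcount ms (PySem.List.pyRange lo b 1) s := by
        rw [hrange, show b - 1 - lo + 1 = ((L : Nat) : Int) by omega]
        exact bsearch_eq_gcount ms lo s L hlo
      rw [hbk]
      set g := gcount ms (PySem.List.pyRange lo b 1) s with hg
      by_cases hlt : g < b - 1 - lo + 1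
      · rw [if_pos hlt, if_neg (by omega : ¬ g = ((PySem.List.pyRange lo b 1).length : Int))]
        ring
      · rw [if_neg hlt]
        have hgL : g = ((L : Nat) : Int) := by
          have h1 := gcount_le_length ms (PySem.List.pyRange lo b 1) s
          rw [hlen] at h1
          omega
        rw [if_pos (by rw [hlen]; exact hgL)]
        have hsum : (PySem.List.pyRange lo b 1).sum =
            g * lo + g * (g - 1) / 2 := by
          rw [hrange, range_sum, hgL]
        have hfd : PySem.Int.floordiv (g * (g - 1)) 2 = g * (g - 1) / 2 :=
          PySem.Int.floordiv_eq_ediv_of_pos (by norm_num)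
        rw [ih (b + 1) (s + (g * lo + PySem.Int.floordiv (g * (g - 1)) 2)) (c + g)
          (by omega) hpw' (fun x hx => ⟨by have := hgt x hx; omega, (hmem x (by simp [hx])).2⟩)]
        rw [hfd, hsum]
        ring
    · rw [if_neg hcase]
      have hlob : lo = b := by omega
      have hempty : PySem.List.pyRange lo b 1 = [] :=
        PySem.List.pyRange_one_eq_nil (by omega)
      rw [hempty]
      simp only [gcount, List.length_nil, List.sum_nil]
      rw [if_pos (by norm_num), add_zero]
      rw [ih (b + 1) s c (by omega) hpw'
        (fun x hx => ⟨by have := hgt x hx; omega, (hmem x (by simp [hx])).2⟩)]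
      omega

-- the A-side loop counts the greedy choices over the filtered remaining range
lemma loopA_len (bset : PySem.Set Int) (ms n : Int) (num s : Int) (ans : List Int) :
    ((maxCountLoopA bset ms n num s ans).length : Int) =
      (ans.length : Int) +
        gcount ms ((PySem.List.pyRange num (n + 1) 1).filter
          (fun x => ! bset.contains x)) s := by
  rw [maxCountLoopA]
  by_cases h : num < n + 1
  · rw [if_pos h, PySem.List.pyRange_one_cons h, List.filter_cons]
    by_cases hc : bset.contains num
    · rw [if_pos hc]
      simp only [hc, Bool.not_true, Bool.false_eq_true, if_false]
      exact loopA_len bset ms n (num + 1) s ans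
    · rw [if_neg hc]
      simp only [eq_false_of_ne_true hc, Bool.not_false, if_true]
      by_cases hbig : s + num > ms
      · rw [if_pos hbig]
        simp only [gcount, if_pos hbig]
        omega
      · rw [if_neg hbig]
        simp only [gcount, if_neg hbig]
        rw [loopA_len bset ms n (num + 1) (s + num) (ans ++ [num])]
        simp only [List.length_append, List.length_cons, List.length_nil]
        push_cast
        omega
  · rw [if_neg h, PySem.List.pyRange_one_eq_nil (by omega)]
    simp [gcount]
termination_by (n + 1 - num).toNat
decreasing_by all_goals omega

theorem maxCount_spec : Claim_equal_maxCount := by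
  intro banned n maxSum _
  unfold Spec_maxCount maxCount maxCount_alt
  set bs := PySem.List.sorted
    (PySem.Set.ofList (banned.filter (fun b => decide (1 ≤ b ∧ b ≤ n))))
    (fun x => x) false with hbs
  have hpw : bs.Pairwise (· < ·) := PySem.List.sorted_ofList_pairwise_lt _
  have hmem : ∀ b ∈ bs, 1 ≤ b ∧ b ≤ n := by
    intro b hb
    rw [hbs, PySem.List.mem_sorted] at hb
    have h2 := (PySem.List.mem_dedup _ _).mp hb
    have h3 := List.mem_filter.mp h2
    simpa using h3.2
  rw [gap_lemma maxSum n bs 1 0 0 (le_refl 1) hpw hmem]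
  rw [loopA_len (PySem.Set.ofList banned) maxSum n 1 0 []]
  simp only [List.length_nil, Nat.cast_zero, zero_add]
  congr 1
  apply List.filter_congr
  intro x hx
  have hxr := PySem.List.mem_pyRange_one.mp hx
  have hxbs : x ∈ bs ↔ x ∈ banned := by
    rw [hbs, PySem.List.mem_sorted]
    constructor
    · intro h
      exact (List.mem_filter.mp ((PySem.List.mem_dedup _ _).mp h)).1
    · intro h
      exact (PySem.List.mem_dedup _ _).mpr
        (List.mem_filter.mpr ⟨h, by simp only [decide_eq_true_eq]; omega⟩)
  have hcont : (PySem.Set.ofList banned).contains x = decide (x ∈ banned) := by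
    by_cases hxb : x ∈ banned <;> simp [PySem.Set.contains_eq_listContains, List.elem_iff, hxb,
      PySem.List.mem_dedup]
  rw [hcont]
  by_cases hxb : x ∈ banned
  · simp [hxb, hxbs.mpr hxb]
  · have hnb : x ∉ bs := fun h => hxb (hxbs.mp h)
    simp [hxb, hnb]
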